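-- pv_equiv track=rewrite | github.com/nitin22032002/leetcode_question | Geek hates too many 1s - GFG/geek-hates-too-many-1s.py | noConseBits
-- ===== SOURCE A (Python) =====
-- def noConseBits(n : int) -> int:
--     c=0
--     for i in range(31,-1,-1):
--         if((n>>i)&1!=0):
--             c+=1
--             if(c==3):
--                 n^=(1<<i)
--                 c=0
--         else:
--             c=0
--     return n
-- ===== SOURCE B (Python) =====
-- def _take_run(p, xs):
--     # longest prefix of xs continuing the run ending at p (consecutive descending), plus the rest
--     if xs and xs[0] == p - 1:
--         run, rest = _take_run(xs[0], xs[1:])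
--         return [xs[0]] + run, rest
--     return [], xs
--
-- def _runs(pos):
--     # split a strictly decreasing position list into maximal consecutive runs
--     if not pos:
--         return []
--     run, rest = _take_run(pos[0], pos[1:])
--     return [[pos[0]] + run] + _runs(rest)
--
-- def _every_third(run):
--     # positions at 1-indexed 3, 6, 9, ... counted from the MSB end of the run
--     return [p for k, p in enumerate(run) if k % 3 == 2]
--
-- def noConseBits(n: int) -> int:
--     pos = [i for i in range(31, -1, -1) if (n >> i) & 1]
--     for run in _runs(pos):
--         for p in _every_third(run):
--             n ^= 1 << p
--     return n
-- ===== Notes on version B (the rewrite author's own statement) =====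
-- stated objective: alternative
-- what changed: A streams bits 31..0 mutating n with a mod-3 run counter; B first collects the set-bit positions, splits them into maximal consecutive runs, selects every third position of each run from the MSB end, and XORs exactly those positions out.
import Mathlib
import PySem

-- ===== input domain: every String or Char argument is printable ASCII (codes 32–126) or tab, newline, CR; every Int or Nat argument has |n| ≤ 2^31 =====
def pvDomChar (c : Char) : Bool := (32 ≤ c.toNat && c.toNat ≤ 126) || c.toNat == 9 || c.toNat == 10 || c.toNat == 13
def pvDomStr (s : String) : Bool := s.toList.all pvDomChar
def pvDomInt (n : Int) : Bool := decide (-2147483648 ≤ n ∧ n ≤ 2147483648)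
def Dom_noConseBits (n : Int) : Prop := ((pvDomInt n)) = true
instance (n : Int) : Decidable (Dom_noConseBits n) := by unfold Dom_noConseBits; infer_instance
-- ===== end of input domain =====

-- B regroups the work as collect-positions / split-into-runs / clear-every-third instead of A's
-- streaming mod-3 counter that mutates n; same cost, an alternative decomposition.
-- Shift amounts are the loop/position indices, always in 0..31, so Lean's Int<<</>>> (which agree
-- with Python's shifts for nonnegative shift amounts) are exact here.

-- ===== PORT A =====
-- loop body of A
def noConseBitsStep (st : Int × Int) (i : Int) : Int × Int :=
  if PySem.Int.band (st.1 >>> i) 1 ≠ 0 then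
    if st.2 + 1 = 3 then (PySem.Int.bxor st.1 ((1 : Int) <<< i), 0)
    else (st.1, st.2 + 1)
  else (st.1, 0)
def noConseBits (n : Int) : Int :=
  ((PySem.List.pyRange 31 (-1) (-1)).foldl noConseBitsStep (n, 0)).1
-- ===== PORT B =====
-- _take_run: longest prefix of xs continuing the descending run ending at p, plus the rest
def takeRunB (p : Int) : List Int → List Int × List Int
  | [] => ([], [])
  | q :: qs =>
    if q = p - 1 then
      let r := takeRunB q qs
      (q :: r.1, r.2)
    else ([], q :: qs)
theorem takeRunB_rest_length : ∀ (xs : List Int) (p : Int), (takeRunB p xs).2.length ≤ xs.length := by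
  intro xs
  induction xs with
  | nil => intro p; simp [takeRunB]
  | cons q qs ih =>
    intro p
    by_cases h : q = p - 1 <;> simp [takeRunB, h]
    exact Nat.le_succ_of_le (ih _)
-- _runs: split the strictly decreasing position list into maximal consecutive runs
def runsB : List Int → List (List Int)
  | [] => []
  | p :: ps =>
    (p :: (takeRunB p ps).1) :: runsB (takeRunB p ps).2
termination_by l => l.length
decreasing_by
  simpa [Nat.lt_succ_iff] using takeRunB_rest_length ps p
-- _every_third: the run elements at 0-based indices k with k %% 3 == 2
def everyThirdB (run : List Int) : List Int :=
  (PySem.List.enumerate run).filterMap (fun kp => if kp.1 % 3 = 2 then some kp.2 else none)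
def noConseBits_alt (n : Int) : Int :=
  let pos := (PySem.List.pyRange 31 (-1) (-1)).filter (fun i => PySem.Int.band (n >>> i) 1 != 0)
  (runsB pos).foldl
    (fun m run => (everyThirdB run).foldl (fun a p => PySem.Int.bxor a ((1 : Int) <<< p)) m) n


-- ===== PRECONDITION & SPEC =====
def Spec_noConseBits (n : Int) (out : Int) : Prop := out = noConseBits_alt n
instance (n : Int) (out : Int) : Decidable (Spec_noConseBits n out) := by unfold Spec_noConseBits; infer_instance

-- ===== CLAIM (what is proved, stated in full; the proofs are below) =====
def Claim_equal_noConseBits : Prop := ∀ (n : Int), Dom_noConseBits n → Spec_noConseBits n (noConseBits n)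

-- ===== LEMMAS AND PROOFS =====

theorem castdiv (m : Nat) (j : Nat) : (m : Int) / 2 ^ j = ((m / 2 ^ j : Nat) : Int) := by
  have h : ((2:Int)^j) = ((2^j : Nat) : Int) := by push_cast; ring
  rw [h, Int.natCast_div]

theorem bitValN (y : Int) (j : Nat) :
    PySem.Int.band (y >>> j) 1 = if y.testBit j then 1 else 0 := by
  rw [PySem.Int.band_one, PySem.Int.mod_eq_emod_of_pos (by norm_num)]
  cases y with
  | ofNat m =>
    show (Int.ofNat (m >>> j)) % 2 = _
    simp only [Int.testBit, Nat.testBit_eq_decide_div_mod_eq, Nat.shiftRight_eq_div_pow]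
    by_cases h : m / 2 ^ j % 2 = 1 <;> simp [h] <;> rw [castdiv] <;> omega
  | negSucc m =>
    rw [Int.negSucc_shiftRight]
    simp only [Int.testBit, Nat.testBit_eq_decide_div_mod_eq, Nat.shiftRight_eq_div_pow,
      Int.negSucc_eq]
    by_cases h : m / 2 ^ j % 2 = 1 <;> simp [h] <;> rw [castdiv] <;> omega

theorem bitVal (y : Int) (j : Int) (h : 0 ≤ j) :
    PySem.Int.band (y >>> j) 1 = if y.testBit j.toNat then 1 else 0 := by
  rw [← bitValN y j.toNat]
  rw [show y >>> j = y >>> (j.toNat : Int) by rw [Int.toNat_of_nonneg h],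
    Int.shiftRight_natCast_right]

theorem bxor_eq_xor (a b : Int) : PySem.Int.bxor a b = a.xor b := by
  cases a <;> cases b <;>
    simp [PySem.Int.bxor, Int.xor, Int.negSucc_eq] <;> omega

theorem one_shl (i : Nat) : ((1:Int) <<< i) = ((2^i : Nat) : Int) := by
  show Int.ofNat 1 <<< i = _
  simp [Int.shiftLeft_eq]

theorem testBit_flip (x : Int) (i j : Int) (hi : 0 ≤ i) (hj : 0 ≤ j) (h : j ≠ i) :
    (PySem.Int.bxor x ((1 : Int) <<< i)).testBit j.toNat = x.testBit j.toNat := by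
  rw [show ((1:Int) <<< i) = (1:Int) <<< (i.toNat : Int) by rw [Int.toNat_of_nonneg hi],
    Int.shiftLeft_natCast_right, bxor_eq_xor, one_shl, Int.testBit_lxor]
  have e : ((2^i.toNat : Nat) : Int).testBit j.toNat = Nat.testBit (2^i.toNat) j.toNat := rfl
  rw [e, Nat.testBit_two_pow]
  have : i.toNat ≠ j.toNat := by omega
  simp [this]

-- proof-side
def downI : Nat → List Int
  | 0 => []
  | k + 1 => (k : Int) :: downI k
theorem mem_downI {p : Int} {k : Nat} (h : p ∈ downI k) : 0 ≤ p ∧ p < (k : Int) := by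
  induction k with
  | zero => simp [downI] at h
  | succ k ih =>
    simp only [downI, List.mem_cons] at h
    rcases h with h | h
    · omega
    · have := ih h; omega
def aSel (n : Int) : Int → List Int → List Int
  | _, [] => []
  | c, i :: L =>
    if PySem.Int.band (n >>> i) 1 ≠ 0 then
      (if c + 1 = 3 then i :: aSel n 0 L else aSel n (c + 1) L)
    else aSel n 0 L
def cEnd (n : Int) : Int → List Int → Int
  | c, [] => c
  | c, i :: L =>
    if PySem.Int.band (n >>> i) 1 ≠ 0 then
      (if c + 1 = 3 then cEnd n 0 L else cEnd n (c + 1) L)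
    else cEnd n 0 L
def foldXor (x : Int) (ps : List Int) : Int :=
  ps.foldl (fun a p => PySem.Int.bxor a ((1 : Int) <<< p)) x

theorem foldXor_cons (x i : Int) (S : List Int) :
    foldXor x (i :: S) = foldXor (PySem.Int.bxor x ((1:Int) <<< i)) S := rfl

theorem foldA : ∀ (L : List Int) (x n : Int) (c : Int),
    (∀ j ∈ L, 0 ≤ j) → L.Pairwise (· > ·) →
    (∀ j ∈ L, x.testBit j.toNat = n.testBit j.toNat) →
    L.foldl noConseBitsStep (x, c) = (foldXor x (aSel n c L), cEnd n c L) := by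
  intro L
  induction L with
  | nil => intro x n c _ _ _; simp [aSel, cEnd, foldXor]
  | cons i L ih =>
    intro x n c hnn hpw hag
    have hpw' := (List.pairwise_cons.mp hpw).2
    have hgt := (List.pairwise_cons.mp hpw).1
    have hi0 : 0 ≤ i := hnn i (by simp)
    have hx : PySem.Int.band (x >>> i) 1 = if n.testBit i.toNat then 1 else 0 := by
      rw [bitVal _ _ hi0, hag i (by simp)]
    have hn : PySem.Int.band (n >>> i) 1 = if n.testBit i.toNat then 1 else 0 :=
      bitVal n i hi0
    by_cases hb : n.testBit i.toNat
    · by_cases hc : c + 1 = 3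
      · have hflip : ∀ j ∈ L, (PySem.Int.bxor x ((1:Int) <<< i)).testBit j.toNat = n.testBit j.toNat := by
          intro j hj
          have h1 : j < i := hgt j hj
          have h0 : 0 ≤ j := hnn j (by simp [hj])
          rw [testBit_flip _ _ _ hi0 h0 (by omega)]
          exact hag j (by simp [hj])
        have step : List.foldl noConseBitsStep (x, c) (i :: L)
            = List.foldl noConseBitsStep (PySem.Int.bxor x ((1:Int) <<< i), 0) L := by
          simp [noConseBitsStep, hx, hb, hc]
        rw [step, ih _ n 0 (fun j hj => hnn j (by simp [hj])) hpw' hflip]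
        have e1 : aSel n c (i :: L) = i :: aSel n 0 L := by simp [aSel, hn, hb, hc]
        have e2 : cEnd n c (i :: L) = cEnd n 0 L := by simp [cEnd, hn, hb, hc]
        rw [e1, e2, foldXor_cons]
      · have step : List.foldl noConseBitsStep (x, c) (i :: L)
            = List.foldl noConseBitsStep (x, c + 1) L := by
          simp [noConseBitsStep, hx, hb, hc]
        rw [step, ih x n (c+1) (fun j hj => hnn j (by simp [hj])) hpw'
          (fun j hj => hag j (by simp [hj]))]
        have e1 : aSel n c (i :: L) = aSel n (c+1) L := by simp [aSel, hn, hb, hc]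
        have e2 : cEnd n c (i :: L) = cEnd n (c+1) L := by simp [cEnd, hn, hb, hc]
        rw [e1, e2]
    · have step : List.foldl noConseBitsStep (x, c) (i :: L)
          = List.foldl noConseBitsStep (x, 0) L := by
        simp [noConseBitsStep, hx, hb]
      rw [step, ih x n 0 (fun j hj => hnn j (by simp [hj])) hpw'
        (fun j hj => hag j (by simp [hj]))]
      have e1 : aSel n c (i :: L) = aSel n 0 L := by simp [aSel, hn, hb]
      have e2 : cEnd n c (i :: L) = cEnd n 0 L := by simp [cEnd, hn, hb]
      rw [e1, e2]

def mid : Int → Option Int → List Int → List Int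
  | _, _, [] => []
  | c, e, p :: ps =>
    if (if e = some p then c + 1 else 1) = 3 then p :: mid 0 (some (p - 1)) ps
    else mid (if e = some p then c + 1 else 1) (some (p - 1)) ps

def pick : Int → List Int → List Int
  | _, [] => []
  | c, q :: qs => if c + 1 = 3 then q :: pick 0 qs else pick (c + 1) qs

theorem mid_zero_e (e e' : Option Int) (ps : List Int) : mid 0 e ps = mid 0 e' ps := by
  cases ps with
  | nil => rfl
  | cons p ps =>
    have h : ∀ f : Option Int, (if f = some p then (0:Int) + 1 else 1) = 1 := by
      intro f; split <;> ring
    simp only [mid, h]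

theorem mid_gap (c : Int) (k : Int) (ps : List Int) (h : ∀ p ∈ ps.head?, p ≠ k) :
    mid c (some k) ps = mid 0 (some k) ps := by
  cases ps with
  | nil => rfl
  | cons p ps =>
    have hp : p ≠ k := h p (by simp)
    have e1 : (if (some k : Option Int) = some p then c + 1 else 1) = 1 := by
      rw [if_neg]
      intro h'; exact hp (by injection h'; omega)
    have e2 : (if (some k : Option Int) = some p then (0:Int) + 1 else 1) = 1 := by
      split <;> ring
    simp only [mid, e1, e2]

theorem aSel_eq_mid (n : Int) : ∀ (k : Nat) (c : Int),
    aSel n c (downI k) =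
      mid c (some ((k : Int) - 1))
        ((downI k).filter (fun i => PySem.Int.band (n >>> i) 1 != 0)) := by
  intro k
  induction k with
  | zero => intro c; simp [downI, aSel, mid]
  | succ k ih =>
    intro c
    have hcast : ((k + 1 : Nat) : Int) - 1 = (k : Int) := by push_cast; ring
    have hmemF : ∀ p ∈ (downI k).filter (fun i => PySem.Int.band (n >>> i) 1 != 0),
        p < (k : Int) := by
      intro p hp
      exact (mem_downI (List.mem_of_mem_filter hp)).2
    by_cases hbit : PySem.Int.band (n >>> (k : Int)) 1 = 0
    · have hf : (downI (k+1)).filter (fun i => PySem.Int.band (n >>> i) 1 != 0)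
          = (downI k).filter (fun i => PySem.Int.band (n >>> i) 1 != 0) := by
        simp [downI, hbit]
      have ha : aSel n c (downI (k+1)) = aSel n 0 (downI k) := by
        simp [downI, aSel, hbit]
      have hhead : ∀ p ∈ ((downI k).filter (fun i => PySem.Int.band (n >>> i) 1 != 0)).head?,
          p ≠ (k : Int) := by
        intro p hp
        have := hmemF p (List.mem_of_mem_head? hp)
        omega
      rw [ha, hf, hcast, ih 0, mid_gap c (k : Int) _ hhead]
      exact mid_zero_e _ _ _
    · have hf : (downI (k+1)).filter (fun i => PySem.Int.band (n >>> i) 1 != 0)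
          = (k : Int) :: (downI k).filter (fun i => PySem.Int.band (n >>> i) 1 != 0) := by
        simp [downI, hbit]
      rw [hf, hcast]
      by_cases hc : c + 1 = 3
      · have ha : aSel n c (downI (k+1)) = (k : Int) :: aSel n 0 (downI k) := by
          simp [downI, aSel, hbit, hc]
        rw [ha, ih 0]
        simp [mid, hc]
      · have ha : aSel n c (downI (k+1)) = aSel n (c+1) (downI k) := by
          simp [downI, aSel, hbit, hc]
        rw [ha, ih (c+1)]
        simp [mid, hc]

theorem mid_run : ∀ (xs : List Int) (p : Int) (c : Int),
    mid c (some (p - 1)) xs = pick c (takeRunB p xs).1 ++ mid 0 none (takeRunB p xs).2 := by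
  intro xs
  induction xs with
  | nil => intro p c; simp [mid, takeRunB, pick]
  | cons q qs ih =>
    intro p c
    by_cases h : q = p - 1
    · subst h
      by_cases hc : c + 1 = 3
      · simp only [mid, takeRunB]
        simp [ih (p-1) 0, hc, pick]
      · simp only [mid, takeRunB]
        simp [ih (p-1) (c+1), hc, pick]
    · have e1 : (if (some (p-1) : Option Int) = some q then c + 1 else 1) = 1 := by
        rw [if_neg]; intro h'; exact h (by injection h'; omega)
      have e2 : (if (none : Option Int) = some q then (0:Int) + 1 else 1) = 1 := by simp
      simp only [takeRunB, if_neg h, pick, List.nil_append, mid, e1, e2]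

theorem enum_cons (q : Int) (qs : List Int) (s : Int) :
    PySem.List.enumerate (q :: qs) s = (s, q) :: PySem.List.enumerate qs (s + 1) := rfl

theorem enum_pick : ∀ (qs : List Int) (s : Int), 0 ≤ s →
    (PySem.List.enumerate qs s).filterMap (fun kp => if kp.1 % 3 = 2 then some kp.2 else none) =
      pick (s % 3) qs := by
  intro qs
  induction qs with
  | nil => intro s _; simp [PySem.List.enumerate, pick]
  | cons q qs ih =>
    intro s hs
    rw [enum_cons, List.filterMap_cons]
    by_cases h : s % 3 = 2
    · have h2 : s % 3 + 1 = 3 := by omega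
      have h3 : (s + 1) % 3 = 0 := by omega
      rw [ih (s+1) (by omega), h3]
      simp [h, pick]
    · have h2 : ¬ (s % 3 + 1 = 3) := by omega
      have h3 : (s + 1) % 3 = s % 3 + 1 := by omega
      rw [ih (s+1) (by omega), h3]
      simp [h, pick, h2]

theorem mid_runs_aux : ∀ (N : Nat) (ps : List Int), ps.length ≤ N → ∀ (e : Option Int),
    mid 0 e ps = (runsB ps).flatMap everyThirdB := by
  intro N
  induction N with
  | zero =>
    intro ps hps e
    have : ps = [] := List.eq_nil_of_length_eq_zero (Nat.le_zero.mp hps)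
    subst this; simp [mid, runsB]
  | succ N ihN =>
    intro ps hps e
    cases ps with
    | nil => simp [mid, runsB]
    | cons p xs =>
      have e1 : (if e = some p then (0:Int) + 1 else 1) = 1 := by split <;> ring
      have step : mid 0 e (p :: xs) = mid 1 (some (p - 1)) xs := by
        simp only [mid, e1]
        norm_num
      rw [step, mid_run xs p 1]
      have hthird : everyThirdB (p :: (takeRunB p xs).1) = pick 1 (takeRunB p xs).1 := by
        unfold everyThirdB
        rw [enum_pick _ 0 (by omega)]
        simp [pick]
      have hlen : (takeRunB p xs).2.length ≤ N := by
        have := takeRunB_rest_length xs p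
        simp at hps
        omega
      show _ = ((runsB (p :: xs)).flatMap everyThirdB)
      rw [runsB]
      simp only [List.flatMap_cons, hthird]
      rw [ihN _ hlen none]

theorem foldB : ∀ (rs : List (List Int)) (x : Int),
    rs.foldl (fun m run => (everyThirdB run).foldl (fun a p => PySem.Int.bxor a ((1 : Int) <<< p)) m) x
      = foldXor x (rs.flatMap everyThirdB) := by
  intro rs
  induction rs with
  | nil => intro x; simp [foldXor]
  | cons r rs ih =>
    intro x
    simp only [List.foldl_cons, List.flatMap_cons, ih]
    simp [foldXor, List.foldl_append]

theorem range_eq_downI : PySem.List.pyRange 31 (-1) (-1) = downI 32 := by decide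

theorem main_equiv (n : Int) : noConseBits n = noConseBits_alt n := by
  unfold noConseBits noConseBits_alt
  rw [range_eq_downI]
  rw [foldA (downI 32) n n 0
    (fun j hj => (mem_downI hj).1)
    (by decide)
    (fun j hj => rfl)]
  rw [foldB]
  have h1 : aSel n 0 (downI 32) =
      mid 0 (some ((32 : Int) - 1)) ((downI 32).filter (fun i => PySem.Int.band (n >>> i) 1 != 0)) := by
    have := aSel_eq_mid n 32 0
    norm_num at this ⊢
    exact this
  rw [h1, mid_runs_aux ((downI 32).filter (fun i => PySem.Int.band (n >>> i) 1 != 0)).length _ le_rfl]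

-- ===== VERDICT (by name: the statement is the Claim_ definition above) =====
theorem noConseBits_spec : Claim_equal_noConseBits := by
  intro n _
  show noConseBits n = noConseBits_alt n
  exact main_equiv n
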